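-- pv_equiv track=rewrite | github.com/Ismat-Samadov/fast_food_chains_analyse | scripts/kfc.py | score_list
-- ===== SOURCE A (Python) =====
-- def score_list(items):
--     if not items or not any(isinstance(item, dict) for item in items):
--         return 0
--     key_hits = 0
--     length = 0
--     keys_of_interest = {
--         "name",
--         "title",
--         "address",
--         "phone",
--         "city",
--         "region",
--         "district",
--         "latitude",
--         "longitude",
--         "lat",
--         "lng",
--         "location",
--         "workingHours",
--         "openingHours",
--         "opening_hours",
--     }
--     for item in items:
--         if not isinstance(item, dict):
--             continue
--         length += 1
--         for key in item.keys():
--             if key in keys_of_interest: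
--                 key_hits += 1
--     return key_hits + min(length, 50)
-- ===== SOURCE B (Python) =====
-- KEYS_OF_INTEREST = (
--     "name", "title", "address", "phone", "city", "region", "district",
--     "latitude", "longitude", "lat", "lng", "location",
--     "workingHours", "openingHours", "opening_hours",
-- )
--
--
-- def score_list(items):
--     dicts = [x for x in items if isinstance(x, dict)]
--     if not dicts:
--         return 0
--     hits = 0
--     for key in KEYS_OF_INTEREST:
--         hits += sum(1 for d in dicts if key in d)
--     return hits + min(len(dicts), 50)
-- ===== Notes on version B (the rewrite author's own statement) =====
-- stated objective: alternative
-- what changed: B transposes the loop nest: instead of scanning each dict's keys against the interest set, it iterates the 15 keys of interest once and counts, per key, how many dicts contain it; the empty/no-dict guard becomes a filtered list checked once.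
import Mathlib
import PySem

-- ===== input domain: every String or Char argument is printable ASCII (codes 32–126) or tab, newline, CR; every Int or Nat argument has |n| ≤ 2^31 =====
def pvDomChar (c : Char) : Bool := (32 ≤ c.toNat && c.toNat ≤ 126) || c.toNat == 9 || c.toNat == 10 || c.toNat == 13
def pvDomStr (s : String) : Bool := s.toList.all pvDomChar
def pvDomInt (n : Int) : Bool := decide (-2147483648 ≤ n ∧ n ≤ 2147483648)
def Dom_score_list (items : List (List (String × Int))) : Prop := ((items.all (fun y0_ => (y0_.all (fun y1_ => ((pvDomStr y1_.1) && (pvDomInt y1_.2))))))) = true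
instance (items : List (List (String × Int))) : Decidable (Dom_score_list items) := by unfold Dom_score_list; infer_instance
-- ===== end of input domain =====

-- B transposes the loop nest (per-key count over the dicts instead of per-dict key scan); same cost, alternative decomposition.


-- ===== PORT A =====
-- the set literal keys_of_interest (a Python set of 15 distinct strings)
def keysOfInterest : PySem.Set String := PySem.Set.ofList
  ["name", "title", "address", "phone", "city", "region", "district",
   "latitude", "longitude", "lat", "lng", "location",
   "workingHours", "openingHours", "opening_hours"]

-- On the typed domain every element of items is a dict, so `any(isinstance(item, dict) …)`
-- is `items ≠ []` and the `continue` branch never fires; otherwise a literal transliteration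
-- (state (key_hits, length), inner loop over the dict's keys).
def score_list (items : List (List (String × Int))) : Int :=
  if items.isEmpty then 0
  else
    let s := items.foldl
      (fun (st : Int × Int) item =>
        (item.foldl (fun kh kv => if kv.1 ∈ keysOfInterest then kh + 1 else kh) st.1,
         st.2 + 1))
      (0, 0)
    s.1 + min s.2 50

-- ===== PORT B =====
-- On the typed domain the isinstance-filter keeps everything, so `dicts` is `items`.
-- Outer loop over the 15 keys of interest; inner pass counts the dicts containing the key.
def score_list_alt (items : List (List (String × Int))) : Int :=
  if items.isEmpty then 0
  else
    let hits := keysOfInterest.foldl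
      (fun acc k =>
        acc + items.foldl (fun c d => if d.any (fun kv => kv.1 == k) then c + 1 else c) 0)
      0
    hits + min (items.length : Int) 50

-- ===== PRECONDITION & SPEC =====
-- Pre_ excludes only association lists that repeat a key inside one item: a Python dict
-- cannot have duplicate keys, so these lists encode no Python input of A.
def Pre_score_list (items : List (List (String × Int))) : Prop :=
  ∀ d ∈ items, (d.map Prod.fst).Nodup
instance (items : List (List (String × Int))) : Decidable (Pre_score_list items) := by
  unfold Pre_score_list; infer_instance

def pvWitness_score_list : (List (List (String × Int))) :=
  [[("name", 1), ("foo", 2)], [("lat", 3)], []]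

def Spec_score_list (items : List (List (String × Int))) (out : Int) : Prop := out = score_list_alt items
instance (items : List (List (String × Int))) (out : Int) : Decidable (Spec_score_list items out) := by unfold Spec_score_list; infer_instance

-- ===== CLAIM (what is proved, stated in full; the proofs are below) =====
def Claim_equal_score_list : Prop := ∀ (items : List (List (String × Int))), Dom_score_list items → Pre_score_list items → Spec_score_list items (score_list items)

-- ===== LEMMAS AND PROOFS =====

-- A's loop: the pair state accumulates the per-dict hit counts and the length.
theorem foldA (items : List (List (String × Int))) (kh ln : Int) :
    items.foldl
      (fun (st : Int × Int) item =>
        (item.foldl (fun kh kv => if kv.1 ∈ keysOfInterest then kh + 1 else kh) st.1,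
         st.2 + 1))
      (kh, ln)
    = (kh + (items.map (fun d => (d.countP (fun kv => kv.1 ∈ keysOfInterest) : Int))).sum,
       ln + items.length) := by
  induction items generalizing kh ln with
  | nil => simp
  | cons d rest ih =>
      simp only [List.foldl_cons]
      rw [ih]
      simp only [PySem.List.foldl_ite_add_one, List.map_cons, List.sum_cons,
        List.length_cons, Prod.mk.injEq]
      constructor <;> push_cast <;> ring

-- counting symmetry for duplicate-free key lists: |{x ∈ l : x ∈ K}| = |{k ∈ K : k ∈ l}|
theorem countP_symm (l K : List String) (hl : l.Nodup) (hK : K.Nodup) :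
    l.countP (fun x => x ∈ K) = K.countP (fun k => k ∈ l) := by
  rw [List.countP_eq_length_filter, List.countP_eq_length_filter]
  rw [← List.toFinset_card_of_nodup (hl.filter _), ← List.toFinset_card_of_nodup (hK.filter _)]
  congr 1
  ext x
  simp only [List.toFinset_filter, Finset.mem_filter, List.mem_toFinset, decide_eq_true_eq]
  tauto

-- the loop transposition: sum over dicts of key hits = sum over keys of dict hits
theorem swap_sum (items : List (List (String × Int)))
    (h : ∀ d ∈ items, (d.map Prod.fst).Nodup) :
    (items.map (fun d => (d.countP (fun kv => kv.1 ∈ keysOfInterest) : Int))).sum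
    = (keysOfInterest.map
        (fun k => (items.countP (fun d => d.any (fun kv => kv.1 == k)) : Int))).sum := by
  induction items with
  | nil => simp
  | cons d rest ih =>
      have hd := h d (List.mem_cons_self)
      have hrest := ih (fun x hx => h x (List.mem_cons_of_mem _ hx))
      simp only [List.map_cons, List.sum_cons, List.countP_cons]
      have hsplit :
          (keysOfInterest.map (fun k =>
            ((rest.countP (fun d' => d'.any (fun kv => kv.1 == k))
              + if d.any (fun kv => kv.1 == k) then 1 else 0 : Nat) : Int))).sum
          = (keysOfInterest.map (fun k =>
              (rest.countP (fun d' => d'.any (fun kv => kv.1 == k)) : Int))).sum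
            + (keysOfInterest.map (fun k =>
              ((if d.any (fun kv => kv.1 == k) then 1 else 0 : Nat) : Int))).sum := by
        push_cast
        exact PySem.List.sum_map_add_int _ _ _
      rw [hsplit, ← hrest]
      have hone :
          (keysOfInterest.map (fun k =>
            ((if d.any (fun kv => kv.1 == k) then 1 else 0 : Nat) : Int))).sum
          = (keysOfInterest.countP (fun k => d.any (fun kv => kv.1 == k)) : Int) := by
        push_cast
        exact PySem.List.sum_map_ite_one_zero _ _
      rw [hone]
      have hKnodup : keysOfInterest.Nodup := by decide
      have hcore : d.countP (fun kv => kv.1 ∈ keysOfInterest)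
          = keysOfInterest.countP (fun k => d.any (fun kv => kv.1 == k)) := by
        have hmapped : d.countP (fun kv => kv.1 ∈ keysOfInterest)
            = (d.map Prod.fst).countP (fun x => x ∈ keysOfInterest) := by
          rw [List.countP_map]; rfl
        rw [hmapped, countP_symm _ _ hd hKnodup]
        apply List.countP_congr
        intro k _
        simp [List.mem_map]
      rw [hcore]
      ring

-- ===== VERDICT (by name: the statement is the Claim_ definition above) =====
theorem score_list_spec : Claim_equal_score_list := by
  intro items _ hpre
  unfold Spec_score_list score_list score_list_alt
  by_cases hemp : items.isEmpty
  · simp [hemp]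
  · simp only [hemp, if_neg, Bool.false_eq_true, not_false_eq_true]
    rw [foldA]
    have hB : keysOfInterest.foldl
        (fun acc k =>
          acc + items.foldl (fun c d => if d.any (fun kv => kv.1 == k) then c + 1 else c) 0)
        0
        = (keysOfInterest.map
            (fun k => (items.countP (fun d => d.any (fun kv => kv.1 == k)) : Int))).sum := by
      have : ∀ k : String,
          items.foldl (fun c d => if d.any (fun kv => kv.1 == k) then c + 1 else c) (0 : Int)
          = (items.countP (fun d => d.any (fun kv => kv.1 == k)) : Int) := by
        intro k
        rw [PySem.List.foldl_if_add_one]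
        ring
      calc keysOfInterest.foldl
            (fun acc k =>
              acc + items.foldl (fun c d => if d.any (fun kv => kv.1 == k) then c + 1 else c) 0) 0
          = keysOfInterest.foldl
            (fun acc k => acc + (items.countP (fun d => d.any (fun kv => kv.1 == k)) : Int)) 0 := by
            apply PySem.List.foldl_congr_mem
            intro a x _; rw [this x]
        _ = _ := by rw [PySem.List.foldl_add]; ring
    rw [hB, swap_sum items hpre]
    simp
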